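-- pv_equiv track=rewrite | github.com/981377660LMT/algorithm-study | tmp/20211128/LCP 08. 剧情触发时间.py | getTriggerTime
-- ===== SOURCE A (Python) =====
-- from typing import List
-- from bisect import bisect_left
--
-- def getTriggerTime(increase: List[List[int]], requirements: List[List[int]]) -> List[int]:
--     a, b, c = [0], [0], [0]
--     for da, db, dc in increase:
--         a.append(a[-1] + da)
--         b.append(b[-1] + db)
--         c.append(c[-1] + dc)
--
--     res = []
--     for x, y, z in requirements:
--         la = bisect_left(a, x)
--         lb = bisect_left(b, y)
--         lc = bisect_left(c, z)
--         upper = max(la, lb, lc)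
--         if upper <= len(increase):
--             res.append(upper)
--         else:
--             res.append(-1)
--
--     return res
-- ===== SOURCE B (Python) =====
-- def getTriggerTime(increase, requirements):
--     n = len(increase)
--     pref = [[0], [0], [0]]
--     for row in increase:
--         for k in range(3):
--             pref[k].append(pref[k][-1] + row[k])
--
--     def solve(lo, hi, qs):
--         # one shared binary descent over the day interval [lo, hi); every pending
--         # query (attribute k, threshold x, requirement i) follows the same probes
--         # bisect_left would make, but all queries descend the tree together
--         if not qs:
--             return []
--         if lo >= hi:
--             return [(i, lo) for _k, _x, i in qs]
--         mid = (lo + hi) // 2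
--         left = [q for q in qs if not pref[q[0]][mid] < q[1]]
--         right = [q for q in qs if pref[q[0]][mid] < q[1]]
--         return solve(lo, mid, left) + solve(mid + 1, hi, right)
--
--     queries = [(k, req[k], i) for i, req in enumerate(requirements) for k in range(3)]
--     best = [0] * len(requirements)
--     for i, day in solve(0, n + 1, queries):
--         if day > best[i]:
--             best[i] = day
--     return [d if d <= n else -1 for d in best]
-- ===== Notes on version B (the rewrite author's own statement) =====
-- stated objective: alternative
-- what changed: B replaces A's per-requirement bisect_left calls by one shared binary descent over the day-interval tree that carries all 3*m (attribute, threshold, index) queries at once, partitioning the pending queries at each probe, then aggregates with a running-max array folded over the answered queries.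
import Mathlib
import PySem

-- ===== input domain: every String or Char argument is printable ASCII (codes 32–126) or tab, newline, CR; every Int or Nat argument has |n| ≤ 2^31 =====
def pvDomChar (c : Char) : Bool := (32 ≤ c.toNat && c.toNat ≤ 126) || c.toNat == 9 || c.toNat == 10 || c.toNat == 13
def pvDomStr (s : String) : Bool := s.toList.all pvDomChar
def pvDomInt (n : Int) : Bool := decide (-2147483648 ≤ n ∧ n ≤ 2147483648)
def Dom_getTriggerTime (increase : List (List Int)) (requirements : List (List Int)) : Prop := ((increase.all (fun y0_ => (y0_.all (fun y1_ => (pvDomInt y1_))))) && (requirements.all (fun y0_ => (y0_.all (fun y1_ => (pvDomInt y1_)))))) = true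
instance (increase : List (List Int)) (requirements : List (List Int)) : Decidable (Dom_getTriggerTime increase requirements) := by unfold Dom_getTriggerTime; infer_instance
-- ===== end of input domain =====

-- B replaces the per-requirement bisect calls by ONE shared binary descent over the day-interval
-- tree that carries all 3·m (attribute, threshold, index) queries at once and partitions them at
-- each probe, then folds a running-max array; same cost, different algorithm; return value only.

-- ===== PORT A =====
-- the stdlib bisect_left A calls (fuel makes the loop structural; fuel = initial hi suffices)
def bisectLeftGo (a : List Int) (x : Int) : Nat → Nat → Nat → Nat
  | 0, lo, _ => lo
  | fuel+1, lo, hi =>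
    if lo < hi then
      if a.getD ((lo + hi) / 2) 0 < x then bisectLeftGo a x fuel ((lo + hi) / 2 + 1) hi
      else bisectLeftGo a x fuel lo ((lo + hi) / 2)
    else lo

def bisectLeft (a : List Int) (x : Int) : Nat := bisectLeftGo a x a.length 0 a.length

def stepA (s : List Int × List Int × List Int) (row : List Int) : List Int × List Int × List Int :=
  match row with
  | [da, db, dc] => (s.1 ++ [s.1.getLastD 0 + da], s.2.1 ++ [s.2.1.getLastD 0 + db], s.2.2 ++ [s.2.2.getLastD 0 + dc])
  | _ => s

def stepResA (abc : List Int × List Int × List Int) (n : Nat) (res : List Int) (row : List Int) : List Int :=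
  match row with
  | [x, y, z] =>
    let la := bisectLeft abc.1 x
    let lb := bisectLeft abc.2.1 y
    let lc := bisectLeft abc.2.2 z
    let upper := max la (max lb lc)
    if (upper : Int) ≤ (n : Int) then res ++ [(upper : Int)] else res ++ [-1]
  | _ => res

def getTriggerTime (increase : List (List Int)) (requirements : List (List Int)) : List Int :=
  let abc := increase.foldl stepA ([0], [0], [0])
  requirements.foldl (stepResA abc increase.length) []

-- ===== PORT B =====
-- pref = [[..],[..],[..]] held as a triple; prefGetB is pref[k]
def prefStepB (p : List Int × List Int × List Int) (row : List Int) : List Int × List Int × List Int :=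
  (p.1 ++ [p.1.getLastD 0 + row.getD 0 0], p.2.1 ++ [p.2.1.getLastD 0 + row.getD 1 0], p.2.2 ++ [p.2.2.getLastD 0 + row.getD 2 0])

def prefGetB (p : List Int × List Int × List Int) : Nat → List Int
  | 0 => p.1
  | 1 => p.2.1
  | _ => p.2.2

-- B's recursive solve(lo, hi, qs); fuel (= hi - lo at the top call) only makes it structural
def solveB (p : List Int × List Int × List Int) : Nat → Nat → Nat → List (Nat × Int × Nat) → List (Nat × Nat)
  | 0, lo, hi, qs =>
    if qs = [] then []
    else if hi ≤ lo then qs.map (fun q => (q.2.2, lo))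
    else []
  | fuel+1, lo, hi, qs =>
    if qs = [] then []
    else if hi ≤ lo then qs.map (fun q => (q.2.2, lo))
    else
      let mid := (lo + hi) / 2
      let left := qs.filter (fun q => !decide ((prefGetB p q.1).getD mid 0 < q.2.1))
      let right := qs.filter (fun q => decide ((prefGetB p q.1).getD mid 0 < q.2.1))
      solveB p fuel lo mid left ++ solveB p fuel (mid+1) hi right

-- the comprehension [(k, req[k], i) for i, req in enumerate(requirements) for k in range(3)]
def qsOfB : Nat → List (List Int) → List (Nat × Int × Nat)
  | _, [] => []
  | i, r :: t => (0, r.getD 0 0, i) :: (1, r.getD 1 0, i) :: (2, r.getD 2 0, i) :: qsOfB (i+1) t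

-- the body of B's 'for i, day in solve(...)' loop
def updB (best : List Nat) (a : Nat × Nat) : List Nat :=
  if best.getD a.1 0 < a.2 then best.set a.1 a.2 else best

def getTriggerTime_alt (increase : List (List Int)) (requirements : List (List Int)) : List Int :=
  let n := increase.length
  let pref := increase.foldl prefStepB ([0], [0], [0])
  let best := (solveB pref (n+1) 0 (n+1) (qsOfB 0 requirements)).foldl updB (List.replicate requirements.length 0)
  best.map (fun d => if d ≤ n then (d : Int) else -1)

-- ===== PRECONDITION & SPEC =====
-- Pre_ excludes exactly the inputs on which A raises ValueError: a row of either list whose length is not 3 (tuple unpacking).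
def Pre_getTriggerTime (increase : List (List Int)) (requirements : List (List Int)) : Prop :=
  (∀ r ∈ increase, r.length = 3) ∧ (∀ r ∈ requirements, r.length = 3)
instance (increase : List (List Int)) (requirements : List (List Int)) : Decidable (Pre_getTriggerTime increase requirements) := by unfold Pre_getTriggerTime; infer_instance

def pvWitness_getTriggerTime : List (List Int) × List (List Int) := ([[2, 8, 4], [2, 1, 1], [0, 6, 5]], [[2, 11, 3], [15, 10, 7], [9, 17, 12], [8, 1, 14]])

def Spec_getTriggerTime (increase : List (List Int)) (requirements : List (List Int)) (out : List Int) : Prop := out = getTriggerTime_alt increase requirements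
instance (increase : List (List Int)) (requirements : List (List Int)) (out : List Int) : Decidable (Spec_getTriggerTime increase requirements out) := by unfold Spec_getTriggerTime; infer_instance

-- ===== CLAIM (what is proved, stated in full; the proofs are below) =====
def Claim_equal_getTriggerTime : Prop := ∀ (increase : List (List Int)) (requirements : List (List Int)), Dom_getTriggerTime increase requirements → Pre_getTriggerTime increase requirements → Spec_getTriggerTime increase requirements (getTriggerTime increase requirements)

-- ===== LEMMAS AND PROOFS =====

-- proof-side prefix-column builder
def colStep (k : Nat) (p : List Int) (row : List Int) : List Int :=
  p ++ [p.getLastD 0 + row.getD k 0]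

-- per-requirement value both sides compute (B's running max of the three bisects, started at 0)
def chainB (inc : List (List Int)) (r : List Int) : Nat :=
  let l0 := bisectLeft (inc.foldl (colStep 0) [0]) (r.getD 0 0)
  let l1 := bisectLeft (inc.foldl (colStep 1) [0]) (r.getD 1 0)
  let l2 := bisectLeft (inc.foldl (colStep 2) [0]) (r.getD 2 0)
  let b0 : Nat := if 0 < l0 then l0 else 0
  let b1 : Nat := if b0 < l1 then l1 else b0
  if b1 < l2 then l2 else b1

theorem len3_cases {r : List Int} (h : r.length = 3) : ∃ a b c, r = [a, b, c] := by
  match r, h with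
  | [a, b, c], _ => exact ⟨a, b, c, rfl⟩

theorem foldA_eq (inc : List (List Int)) (s : List Int × List Int × List Int)
    (h : ∀ r ∈ inc, r.length = 3) :
    inc.foldl stepA s =
      (inc.foldl (colStep 0) s.1, inc.foldl (colStep 1) s.2.1, inc.foldl (colStep 2) s.2.2) := by
  induction inc generalizing s with
  | nil => rfl
  | cons r t ih =>
    obtain ⟨a, b, c, rfl⟩ := len3_cases (h r (by simp))
    simp only [List.foldl_cons]
    rw [ih _ (fun r hr => h r (by simp [hr]))]
    rfl

theorem foldB_eq (inc : List (List Int)) (s : List Int × List Int × List Int) :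
    inc.foldl prefStepB s =
      (inc.foldl (colStep 0) s.1, inc.foldl (colStep 1) s.2.1, inc.foldl (colStep 2) s.2.2) := by
  induction inc generalizing s with
  | nil => rfl
  | cons r t ih =>
    simp only [List.foldl_cons]
    rw [ih]
    rfl

theorem colStep_len (k : Nat) (inc : List (List Int)) : ∀ (p : List Int),
    (inc.foldl (colStep k) p).length = p.length + inc.length := by
  induction inc with
  | nil => intro p; simp
  | cons r t ih =>
    intro p
    simp only [List.foldl_cons]
    rw [ih]
    simp [colStep]
    omega

theorem stepResA_append (abc : List Int × List Int × List Int) (n : Nat) (res : List Int) (row : List Int) :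
    stepResA abc n res row = res ++ stepResA abc n [] row := by
  unfold stepResA
  split
  · dsimp only
    split_ifs <;> simp
  · simp

theorem foldResA_eq (abc : List Int × List Int × List Int) (n : Nat) :
    ∀ (reqs : List (List Int)) (acc : List Int),
      reqs.foldl (stepResA abc n) acc = acc ++ reqs.flatMap (stepResA abc n []) := by
  intro reqs
  induction reqs with
  | nil => simp
  | cons r t ih =>
    intro acc
    simp only [List.foldl_cons, List.flatMap_cons]
    rw [ih, stepResA_append, List.append_assoc]

theorem elem_eq (inc : List (List Int)) (x y z : Int) :
    stepResA (inc.foldl (colStep 0) [0], inc.foldl (colStep 1) [0], inc.foldl (colStep 2) [0])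
        inc.length [] [x, y, z] =
      [if chainB inc [x, y, z] ≤ inc.length then (chainB inc [x, y, z] : Int) else -1] := by
  simp only [stepResA, chainB, List.getD_cons_zero, List.getD_cons_succ]
  set la := bisectLeft (inc.foldl (colStep 0) [0]) x with hla
  set lb := bisectLeft (inc.foldl (colStep 1) [0]) y with hlb
  set lc := bisectLeft (inc.foldl (colStep 2) [0]) z with hlc
  have hmax : (if (if (if 0 < la then la else 0) < lb then lb else (if 0 < la then la else 0)) < lc
      then lc else (if (if 0 < la then la else 0) < lb then lb else (if 0 < la then la else 0)))
      = max la (max lb lc) := by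
    split_ifs <;> omega
  rw [hmax]
  have hcast : (((max la (max lb lc) : Nat) : Int) ≤ (inc.length : Int)) ↔ (max la (max lb lc) ≤ inc.length) := by
    exact_mod_cast Iff.rfl
  split_ifs with h1 h2 h2
  · rfl
  · exact absurd (hcast.mp h1) h2
  · exact absurd (hcast.mpr h2) h1
  · rfl

-- A's result in canonical map form
theorem A_canon (inc reqs : List (List Int))
    (hinc : ∀ r ∈ inc, r.length = 3) (hreq : ∀ r ∈ reqs, r.length = 3) :
    getTriggerTime inc reqs =
      reqs.map (fun r => if chainB inc r ≤ inc.length then (chainB inc r : Int) else -1) := by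
  unfold getTriggerTime
  rw [foldA_eq inc ([0], [0], [0]) hinc, foldResA_eq, List.nil_append]
  induction reqs with
  | nil => rfl
  | cons r t ih =>
    obtain ⟨x, y, z, rfl⟩ := len3_cases (hreq r (by simp))
    rw [List.flatMap_cons, elem_eq, List.map_cons, ih (fun r hr => hreq r (by simp [hr]))]
    rfl

-- ---- B side ----

-- the shared descent answers each query with exactly its bisect_left descent result (as a multiset)
theorem solveB_perm (p : List Int × List Int × List Int) :
    ∀ (fuel lo hi : Nat) (qs : List (Nat × Int × Nat)), hi - lo ≤ fuel →
      (solveB p fuel lo hi qs).Perm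
        (qs.map (fun q => (q.2.2, bisectLeftGo (prefGetB p q.1) q.2.1 fuel lo hi))) := by
  intro fuel
  induction fuel with
  | zero =>
    intro lo hi qs hle
    have hhi : hi ≤ lo := by omega
    by_cases hqs : qs = []
    · subst hqs; simp [solveB]
    · simp [solveB, hqs, hhi, bisectLeftGo]
  | succ fuel ih =>
    intro lo hi qs hle
    by_cases hqs : qs = []
    · subst hqs; simp [solveB]
    by_cases hhi : hi ≤ lo
    · simp only [solveB, if_neg hqs, if_pos hhi]
      have heq : ∀ q ∈ qs, ((q.2.2, lo) : Nat × Nat) = (q.2.2, bisectLeftGo (prefGetB p q.1) q.2.1 (fuel+1) lo hi) := by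
        intro q _
        simp [bisectLeftGo, Nat.not_lt.mpr hhi]
      rw [List.map_congr_left heq]
    · have hlt : lo < hi := Nat.not_le.mp hhi
      simp only [solveB, if_neg hqs, if_neg hhi]
      set mid := (lo + hi) / 2 with hmid
      set cond := fun q : Nat × Int × Nat => decide ((prefGetB p q.1).getD mid 0 < q.2.1) with hcond
      set f := fun q : Nat × Int × Nat => ((q.2.2, bisectLeftGo (prefGetB p q.1) q.2.1 (fuel+1) lo hi) : Nat × Nat) with hf
      have ihl := ih lo mid (qs.filter (fun q => !cond q)) (by omega)
      have ihr := ih (mid+1) hi (qs.filter cond) (by omega)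
      have hL : (qs.filter (fun q => !cond q)).map
            (fun q => ((q.2.2, bisectLeftGo (prefGetB p q.1) q.2.1 fuel lo mid) : Nat × Nat))
          = (qs.filter (fun q => !cond q)).map f := by
        apply List.map_congr_left
        intro q hq
        have hc : ¬ ((prefGetB p q.1).getD mid 0 < q.2.1) := by
          have := (List.mem_filter.mp hq).2
          simpa [hcond] using this
        have hc' : ¬ ((prefGetB p q.1)[mid]?.getD 0 < q.2.1) := by
          simpa [List.getD_eq_getElem?_getD] using hc
        simp [hf, bisectLeftGo, hlt, ← hmid, hc']
      have hR : (qs.filter cond).map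
            (fun q => ((q.2.2, bisectLeftGo (prefGetB p q.1) q.2.1 fuel (mid+1) hi) : Nat × Nat))
          = (qs.filter cond).map f := by
        apply List.map_congr_left
        intro q hq
        have hc : (prefGetB p q.1).getD mid 0 < q.2.1 := by
          have := (List.mem_filter.mp hq).2
          simpa [hcond] using this
        have hc' : (prefGetB p q.1)[mid]?.getD 0 < q.2.1 := by
          simpa [List.getD_eq_getElem?_getD] using hc
        simp [hf, bisectLeftGo, hlt, ← hmid, hc']
      rw [hL] at ihl
      rw [hR] at ihr
      have hperm : ((qs.filter (fun q => !cond q)) ++ (qs.filter cond)).Perm qs := by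
        exact (List.perm_append_comm.trans (List.filter_append_perm cond qs))
      have h3 : ((qs.filter (fun q => !cond q)).map f ++ (qs.filter cond).map f).Perm (qs.map f) := by
        rw [← List.map_append]
        exact hperm.map f
      exact (ihl.append ihr).trans h3

-- updB is right-commutative, so the fold only depends on the multiset of assignments
theorem updB_oob (c : List Nat) (k x : Nat) (h : c.length ≤ k) : updB c (k, x) = c := by
  unfold updB
  split_ifs with h1
  · exact List.set_eq_of_length_le h
  · rfl

theorem updB_set (c : List Nat) (k x : Nat) (h : k < c.length) :
    updB c (k, x) = c.set k (max (c.getD k 0) x) := by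
  unfold updB
  by_cases hx : c.getD k 0 < x
  · rw [if_pos hx, Nat.max_eq_right (Nat.le_of_lt hx)]
  · rw [if_neg hx, Nat.max_eq_left (Nat.le_of_not_lt hx)]
    apply List.ext_getElem (by simp)
    intro m hm1 hm2
    by_cases hmk : m = k
    · subst hmk
      rw [List.getElem_set_self]
      rw [List.getD_eq_getElem?_getD, List.getElem?_eq_getElem hm1]
      rfl
    · rw [List.getElem_set_ne (Ne.symm hmk)]

theorem getD_set_self (c : List Nat) (k v : Nat) (h : k < c.length) :
    (c.set k v).getD k 0 = v := by
  rw [List.getD_eq_getElem?_getD, List.getElem?_set_self h]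
  rfl

theorem getD_set_ne (c : List Nat) (k l v : Nat) (h : k ≠ l) :
    (c.set k v).getD l 0 = c.getD l 0 := by
  rw [List.getD_eq_getElem?_getD, List.getElem?_set_ne h, ← List.getD_eq_getElem?_getD]

theorem updB_comm (b : List Nat) (a₁ a₂ : Nat × Nat) :
    updB (updB b a₁) a₂ = updB (updB b a₂) a₁ := by
  rcases a₁ with ⟨i, d⟩
  rcases a₂ with ⟨j, e⟩
  by_cases hij : i = j
  · subst hij
    by_cases hlen : i < b.length
    · rw [updB_set b i d hlen, updB_set b i e hlen,
          updB_set _ i e (by rw [List.length_set]; exact hlen),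
          updB_set _ i d (by rw [List.length_set]; exact hlen),
          getD_set_self b i _ hlen, getD_set_self b i _ hlen,
          List.set_set, List.set_set]
      congr 1
      rw [Nat.max_assoc, Nat.max_comm d e, ← Nat.max_assoc]
    · have h : b.length ≤ i := Nat.le_of_not_lt hlen
      simp only [updB_oob b i d h, updB_oob b i e h]
  · by_cases hi : i < b.length <;> by_cases hj : j < b.length
    · rw [updB_set b i d hi, updB_set b j e hj,
          updB_set _ j e (by rw [List.length_set]; exact hj),
          updB_set _ i d (by rw [List.length_set]; exact hi),
          getD_set_ne b i j _ hij, getD_set_ne b j i _ (Ne.symm hij),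
          List.set_comm _ _ hij]
    · rw [updB_set b i d hi, updB_oob b j e (Nat.le_of_not_lt hj),
          updB_oob _ j e (by rw [List.length_set]; exact Nat.le_of_not_lt hj),
          updB_set b i d hi]
    · rw [updB_oob b i d (Nat.le_of_not_lt hi), updB_set b j e hj,
          updB_oob _ i d (by rw [List.length_set]; exact Nat.le_of_not_lt hi)]
    · simp only [updB_oob b i d (Nat.le_of_not_lt hi), updB_oob b j e (Nat.le_of_not_lt hj)]

theorem qsOfB_shift : ∀ (t : List (List Int)) (i : Nat),
    qsOfB (i+1) t = (qsOfB i t).map (fun q => (q.1, q.2.1, q.2.2 + 1)) := by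
  intro t
  induction t with
  | nil => intro i; rfl
  | cons r s ih => intro i; simp [qsOfB, ih (i+1)]

theorem foldUpd_shift (L : List (Nat × Nat)) : ∀ (x : Nat) (best : List Nat),
    (L.map (fun a => (a.1 + 1, a.2))).foldl updB (x :: best) = x :: L.foldl updB best := by
  induction L with
  | nil => intro x best; rfl
  | cons a t ih =>
    intro x best
    rcases a with ⟨j, d⟩
    simp only [List.map_cons, List.foldl_cons]
    have h : updB (x :: best) (j + 1, d) = x :: updB best (j, d) := by
      unfold updB
      simp only [List.getD_cons_succ, List.set_cons_succ]
      split_ifs <;> rfl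
    rw [h, ih]

theorem updB_zero (v L : Nat) (rest : List Nat) :
    updB (v :: rest) (0, L) = (if v < L then L else v) :: rest := by
  unfold updB
  simp only [List.getD_cons_zero, List.set_cons_zero]
  split_ifs <;> rfl

-- folding the in-order assignment list gives B's running max per requirement
theorem agg_eq (inc : List (List Int)) (P : List Int × List Int × List Int) (n : Nat)
    (hb : ∀ k, k < 3 → ∀ x, bisectLeftGo (prefGetB P k) x (n+1) 0 (n+1) = bisectLeft (inc.foldl (colStep k) [0]) x) :
    ∀ (reqs : List (List Int)),
      ((qsOfB 0 reqs).map (fun q => ((q.2.2, bisectLeftGo (prefGetB P q.1) q.2.1 (n+1) 0 (n+1)) : Nat × Nat))).foldl updB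
          (List.replicate reqs.length 0)
        = reqs.map (chainB inc) := by
  intro reqs
  induction reqs with
  | nil => rfl
  | cons r t ih =>
    simp only [qsOfB, List.map_cons, List.length_cons, List.replicate_succ, List.foldl_cons]
    rw [updB_zero, updB_zero, updB_zero]
    rw [hb 0 (by omega), hb 1 (by omega), hb 2 (by omega)]
    rw [qsOfB_shift t 0, List.map_map]
    have hcomp : ((fun q : Nat × Int × Nat => ((q.2.2, bisectLeftGo (prefGetB P q.1) q.2.1 (n+1) 0 (n+1)) : Nat × Nat)) ∘ (fun q : Nat × Int × Nat => (q.1, q.2.1, q.2.2 + 1)))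
        = (fun a : Nat × Nat => (a.1 + 1, a.2)) ∘ (fun q : Nat × Int × Nat => ((q.2.2, bisectLeftGo (prefGetB P q.1) q.2.1 (n+1) 0 (n+1)) : Nat × Nat)) := by
      funext q; rfl
    rw [hcomp, ← List.map_map, foldUpd_shift, ih]
    rfl

-- ===== VERDICT (by name: the statement is the Claim_ definition above) =====
theorem getTriggerTime_spec : Claim_equal_getTriggerTime := by
  intro inc reqs _dom hpre
  obtain ⟨hinc, hreq⟩ := hpre
  unfold Spec_getTriggerTime
  rw [A_canon inc reqs hinc hreq]
  have hB : getTriggerTime_alt inc reqs =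
      ((solveB (inc.foldl prefStepB ([0], [0], [0])) (inc.length+1) 0 (inc.length+1) (qsOfB 0 reqs)).foldl updB
        (List.replicate reqs.length 0)).map (fun d => if d ≤ inc.length then (d : Int) else -1) := rfl
  rw [hB]
  have hperm := solveB_perm (inc.foldl prefStepB ([0], [0], [0])) (inc.length+1) 0 (inc.length+1) (qsOfB 0 reqs) (by omega)
  have hfold := hperm.foldl_eq' (fun x _ y _ z => updB_comm z x y) (List.replicate reqs.length 0)
  rw [hfold]
  have hb : ∀ k, k < 3 → ∀ x, bisectLeftGo (prefGetB (inc.foldl prefStepB ([0], [0], [0])) k) x (inc.length+1) 0 (inc.length+1) = bisectLeft (inc.foldl (colStep k) [0]) x := by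
    intro k hk x
    have hP : prefGetB (inc.foldl prefStepB ([0], [0], [0])) k = inc.foldl (colStep k) [0] := by
      rw [foldB_eq]
      interval_cases k <;> rfl
    rw [hP]
    simp [bisectLeft, colStep_len, Nat.add_comm]
  rw [agg_eq inc _ inc.length hb reqs, List.map_map]
  rfl
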